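-- pv_equiv track=rewrite | github.com/mluisa/AdventOfCode | src/aoc_2023/day_3.py | _group_engine_parts_by_position
-- ===== SOURCE A (Python) =====
-- VALID_SYMBOL = "*"
--
-- def _group_engine_parts_by_position(adjacent_engine_parts):
--     engine_parts = {}
--     for part in adjacent_engine_parts:
--         part_value = part[0]
--         part_symbol = part[1][0]
--         part_position = part[1][1]
--
--         if part_symbol == VALID_SYMBOL:
--             engine_parts.setdefault(part_position, []).append(part_value)
--
--     return engine_parts
-- ===== SOURCE B (Python) =====
-- VALID_SYMBOL = "*"
--
-- def _group_engine_parts_by_position(adjacent_engine_parts):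
--     # Two-pass: filter to '*' entries once, then for each first-seen position
--     # collect all of its values with a comprehension (no incremental dict grouping).
--     valid = [(part[1][1], part[0]) for part in adjacent_engine_parts
--              if part[1][0] == VALID_SYMBOL]
--     return {pos: [v for q, v in valid if q == pos]
--             for pos in dict.fromkeys(q for q, _ in valid)}
-- ===== Notes on version B (the rewrite author's own statement) =====
-- stated objective: alternative
-- what changed: Replaces the incremental dict-with-setdefault grouping by a two-pass scheme: filter the '*' entries once into (position, value) pairs, then build the result with a dict comprehension that, for each first-seen position, collects its values by a comprehension over the filtered list.
import Mathlib
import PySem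

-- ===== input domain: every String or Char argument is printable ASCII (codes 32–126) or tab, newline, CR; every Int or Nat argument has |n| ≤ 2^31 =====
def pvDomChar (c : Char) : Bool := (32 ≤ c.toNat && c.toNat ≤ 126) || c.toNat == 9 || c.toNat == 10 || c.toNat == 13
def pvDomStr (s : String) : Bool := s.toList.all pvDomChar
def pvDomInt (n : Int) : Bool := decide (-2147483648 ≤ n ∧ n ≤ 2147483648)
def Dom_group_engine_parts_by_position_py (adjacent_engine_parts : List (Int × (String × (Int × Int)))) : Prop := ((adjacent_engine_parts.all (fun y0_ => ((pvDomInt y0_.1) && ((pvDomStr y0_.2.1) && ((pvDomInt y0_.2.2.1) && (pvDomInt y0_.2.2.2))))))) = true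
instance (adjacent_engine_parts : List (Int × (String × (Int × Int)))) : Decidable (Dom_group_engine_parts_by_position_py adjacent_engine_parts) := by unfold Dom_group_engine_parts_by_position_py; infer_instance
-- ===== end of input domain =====

-- ===== PORT A =====
-- Port of A: single pass building a dict with setdefault(...).append (= Dict.modify), then its items.
def group_engine_parts_by_position_py (adjacent_engine_parts : List (Int × (String × (Int × Int)))) : List (Int × Int × List Int) :=
  let engine_parts : PySem.Dict (Int × Int) (List Int) :=
    adjacent_engine_parts.foldl (fun d part =>
      let part_value := part.1
      let part_symbol := part.2.1
      let part_position := part.2.2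
      if part_symbol == "*" then d.modify part_position [] (fun v => v ++ [part_value]) else d)
      PySem.Dict.empty
  engine_parts.items.map (fun p => (p.1.1, p.1.2, p.2))

-- ===== PORT B =====
-- Port of B: filter the '*' entries once, then map each first-seen position to its values by a scan.
def group_engine_parts_by_position_py_alt (adjacent_engine_parts : List (Int × (String × (Int × Int)))) : List (Int × Int × List Int) :=
  let valid := (adjacent_engine_parts.filter (fun part => part.2.1 == "*")).map (fun part => (part.2.2, part.1))
  (PySem.List.dedup (valid.map (fun q => q.1))).map
    (fun pos => (pos.1, pos.2, (valid.filter (fun q => q.1 == pos)).map (fun q => q.2)))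

-- ===== PRECONDITION & SPEC =====
def Spec_group_engine_parts_by_position_py (adjacent_engine_parts : List (Int × (String × (Int × Int)))) (out : List (Int × Int × List Int)) : Prop := out = group_engine_parts_by_position_py_alt adjacent_engine_parts
instance (adjacent_engine_parts : List (Int × (String × (Int × Int)))) (out : List (Int × Int × List Int)) : Decidable (Spec_group_engine_parts_by_position_py adjacent_engine_parts out) := by unfold Spec_group_engine_parts_by_position_py; infer_instance

-- ===== CLAIM (what is proved, stated in full; the proofs are below) =====
def Claim_equal_group_engine_parts_by_position_py : Prop := ∀ (adjacent_engine_parts : List (Int × (String × (Int × Int)))), Dom_group_engine_parts_by_position_py adjacent_engine_parts → Spec_group_engine_parts_by_position_py adjacent_engine_parts (group_engine_parts_by_position_py adjacent_engine_parts)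

-- ===== LEMMAS AND PROOFS =====

-- A dict with Nodup keys is its key list paired with the looked-up values.
theorem dict_items_eq_keys_map {κ ν : Type} [BEq κ] [LawfulBEq κ] (d : PySem.Dict κ ν)
    (h : d.keys.Nodup) (dflt : ν) :
    d.items = d.keys.map (fun k => (k, d.getD k dflt)) := by
  have hk : d.keys = d.items.map (fun p => p.1) := by simp [PySem.Dict.keys]
  rw [hk, List.map_map]
  have : ∀ p ∈ d.items, ((fun k => (k, d.getD k dflt)) ∘ fun p => p.1) p = id p := by
    intro p hp
    have := PySem.Dict.getD_of_mem_items d (k := p.1) (v := p.2) (by exact hp) h dflt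
    simp [this]
  rw [List.map_congr_left this, List.map_id]

theorem group_A_eq_B (adjacent_engine_parts : List (Int × (String × (Int × Int)))) :
    group_engine_parts_by_position_py adjacent_engine_parts
      = group_engine_parts_by_position_py_alt adjacent_engine_parts := by
  unfold group_engine_parts_by_position_py group_engine_parts_by_position_py_alt
  simp only
  set valid := (adjacent_engine_parts.filter (fun part => part.2.1 == "*")).map (fun part => (part.2.2, part.1)) with hvalid
  -- the conditional fold over the input is the unconditional modify-fold over `valid`
  have hfold :
      adjacent_engine_parts.foldl (fun d part =>
          if part.2.1 == "*" then d.modify part.2.2 [] (fun v => v ++ [part.1]) else d)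
        (PySem.Dict.empty : PySem.Dict (Int × Int) (List Int))
      = valid.foldl (fun d p => d.modify p.1 [] (fun v => v ++ [p.2])) PySem.Dict.empty := by
    rw [hvalid, List.foldl_map, List.foldl_filter]
  rw [hfold]
  set D := valid.foldl (fun d p => d.modify p.1 [] (fun v => v ++ [p.2])) PySem.Dict.empty with hD
  have hnodup : D.keys.Nodup := by
    rw [hD]
    exact PySem.Dict.nodup_keys_foldl_modify_key valid (fun p => p.1) []
      (fun d p => fun v => v ++ [p.2]) PySem.Dict.empty (by simp)
  have hkeys : D.keys = PySem.List.dedup (valid.map (fun q => q.1)) := by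
    rw [hD, PySem.Dict.keys_foldl_modify_key valid (fun p => p.1) []
      (fun d p => fun v => v ++ [p.2]) PySem.Dict.empty]
    simp [PySem.List.dedup_eq_ofList, PySem.Set.update_nil_left]
  have hget : ∀ k, D.getD k [] = (valid.filter (fun q => q.1 == k)).map (fun q => q.2) := by
    intro k
    rw [hD, PySem.Dict.getD_foldl_modify_append valid PySem.Dict.empty k]
    simp
  rw [dict_items_eq_keys_map D hnodup [], hkeys, List.map_map]
  refine List.map_congr_left ?_
  intro pos _
  simp [hget pos]

-- ===== VERDICT (by name: the statement is the Claim_ definition above) =====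
theorem group_engine_parts_by_position_py_spec : Claim_equal_group_engine_parts_by_position_py := by
  intro xs _
  unfold Spec_group_engine_parts_by_position_py
  exact group_A_eq_B xs
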